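-- pv_equiv track=rewrite | github.com/yoonoolee/machine_learning | Primer/hw1.py | mode_digit
-- ===== SOURCE A (Python) =====
-- def mode_digit(n):
--     """
--     parameters: integer n
--     returns the digit that appears most frequently
--     edgecase: if tied return the bigger digit
--     """
--     n = abs(n)
--     if n == 0:
--         return 0
--     else:
--         nums = list(range(10))
--         counts = {key: 0 for key in nums}  # dictionary of key of 0 to 9
--         while n > 0:
--             digit = n % 10  # digit at the end
--             counts[digit] += 1
--             n //= 10  # remove digit at the end
--         mode = 0
--         largest_count = 0
--         for k, v in counts.items():
--             if v >= largest_count:  # do = too to get the greatest k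
--                 largest_count = v
--                 mode = k
--         return mode
-- ===== SOURCE B (Python) =====
-- def mode_digit(n):
--     s = str(abs(n))
--     return max(range(9, -1, -1), key=lambda d: s.count(str(d)))
-- ===== Notes on version B (the rewrite author's own statement) =====
-- stated objective: simpler
-- what changed: Counts digits by scanning the decimal string str(abs(n)) with str.count instead of a mod/floordiv loop into a dict, and selects the winner with a keyed max over range(9,-1,-1) (first maximum, so the larger digit wins ties) instead of the manual >=-accumulator scan; the n==0 special case disappears since str(abs(0)) is '0'.
import Mathlib
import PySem

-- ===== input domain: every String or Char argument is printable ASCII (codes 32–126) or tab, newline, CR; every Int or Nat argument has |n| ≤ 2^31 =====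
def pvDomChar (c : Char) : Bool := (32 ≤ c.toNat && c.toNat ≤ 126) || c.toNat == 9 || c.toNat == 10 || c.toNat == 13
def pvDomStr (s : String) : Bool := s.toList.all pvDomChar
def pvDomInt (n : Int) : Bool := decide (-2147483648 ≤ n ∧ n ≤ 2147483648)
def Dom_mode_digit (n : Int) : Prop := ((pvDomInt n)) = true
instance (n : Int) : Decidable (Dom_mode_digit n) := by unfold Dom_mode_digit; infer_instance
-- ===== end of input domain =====

-- B counts digits on the decimal string str(abs(n)) and picks the winner with a keyed max over
-- range(9,-1,-1) (first maximum, so ties favour the larger digit), replacing A's mod/floordiv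
-- dict loop and manual >=-accumulator scan; objective: simpler, same asymptotic cost.

-- ===== PORT A =====
-- A's while loop: while n > 0: counts[n % 10] += 1; n //= 10
def modeLoopA (n : Int) (counts : PySem.Dict Int Int) : PySem.Dict Int Int :=
  if h : 0 < n then
    modeLoopA (PySem.Int.floordiv n 10) (counts.modify (PySem.Int.mod n 10) 0 (· + 1))
  else counts
  termination_by n.toNat
  decreasing_by
    rw [PySem.Int.floordiv_eq_ediv_of_pos (show (0:Int) < 10 by norm_num)]
    omega

def mode_digit (n : Int) : Int :=
  let m := if n < 0 then -n else n          -- n = abs(n)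
  if m = 0 then 0
  else
    let nums := PySem.List.pyRange 0 10 1
    let counts0 := nums.foldl (fun d k => d.insert k 0) (PySem.Dict.mk [])   -- {key: 0 for key in nums}
    let counts := modeLoopA m counts0
    -- for k, v in counts.items(): if v >= largest_count: largest_count = v; mode = k
    (counts.items.foldl (fun (p : Int × Int) kv => if p.2 ≤ kv.2 then kv else p) (0, 0)).1

-- ===== PORT B =====
-- B: s = str(abs(n)); return max(range(9, -1, -1), key=lambda d: s.count(str(d)))
-- (the range is nonempty, so Python's max never raises; maxD's default 0 is never used)
def mode_digit_alt (n : Int) : Int :=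
  let s := PySem.Int.toStr (if n < 0 then -n else n)
  PySem.List.maxD (PySem.List.pyRange 9 (-1) (-1))
    (fun d => PySem.Str.count s (PySem.Int.toStr d)) 0

-- ===== PRECONDITION & SPEC =====
def Spec_mode_digit (n : Int) (out : Int) : Prop := out = mode_digit_alt n
instance (n : Int) (out : Int) : Decidable (Spec_mode_digit n out) := by unfold Spec_mode_digit; infer_instance

-- ===== CLAIM (what is proved, stated in full; the proofs are below) =====
def Claim_equal_mode_digit : Prop := ∀ (n : Int), Dom_mode_digit n → Spec_mode_digit n (mode_digit n)

-- ===== LEMMAS AND PROOFS =====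

-- digit-count of k in M's decimal digits
def cnt (M k : Nat) : Nat := (Nat.digits 10 M).count k

-- the ten keys of A's dict, as Ints
def L10 : List Int := (List.range 10).map (fun i : Nat => (i : Int))

-- A's selection step ("ties to the later entry") and B's ("ties to the earlier entry")
def opLe (p q : Int × Int) : Int × Int := if p.2 ≤ q.2 then q else p
def opLt (p q : Int × Int) : Int × Int := if p.2 < q.2 then q else p

-- first-maximum ("ties to the earlier element") of m :: S
def fm : Int × Int → List (Int × Int) → Int × Int
  | m, [] => m
  | m, x :: S => let r := fm x S; if r.2 ≤ m.2 then m else r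

def fmL : List (Int × Int) → Int × Int
  | [] => (0, 0)
  | x :: S => fm x S

theorem fm_snd_le (S : List (Int × Int)) (m : Int × Int) : m.2 ≤ (fm m S).2 := by
  induction S generalizing m with
  | nil => simp [fm]
  | cons x S ih => simp only [fm]; split <;> omega

theorem foldl_opLt_eq_fm (S : List (Int × Int)) (m : Int × Int) :
    List.foldl opLt m S = fm m S := by
  induction S generalizing m with
  | nil => rfl
  | cons x S ih =>
    simp only [List.foldl_cons, ih, fm, opLt]
    by_cases h : m.2 < x.2
    · have hx := fm_snd_le S x
      simp [h, show ¬ (fm x S).2 ≤ m.2 by omega]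
    · simp only [if_neg h]
      cases S with
      | nil => simp [fm]; omega
      | cons y T =>
        simp only [fm]
        by_cases h1 : (fm y T).2 ≤ x.2
        · simp [h1, show (fm y T).2 ≤ m.2 by omega, show x.2 ≤ m.2 by omega]
        · simp [h1]

theorem fm_snoc2 (T : List (Int × Int)) (z a b : Int × Int) :
    fm z (T ++ [a, b]) = fm z (T ++ [if b.2 ≤ a.2 then a else b]) := by
  induction T generalizing z with
  | nil =>
    simp only [List.nil_append, fm]
  | cons t T ih => simp only [List.cons_append, fm, ih]

theorem fmL_snoc2 (T : List (Int × Int)) (a b : Int × Int) :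
    fmL (T ++ [a, b]) = fmL (T ++ [if b.2 ≤ a.2 then a else b]) := by
  cases T with
  | nil =>
    simp only [List.nil_append, fmL, fm]
  | cons t T => simp only [List.cons_append, fmL, fm_snoc2]

theorem foldl_opLe_eq_fmL (S : List (Int × Int)) (m : Int × Int) :
    List.foldl opLe m S = fmL ((m :: S).reverse) := by
  induction S generalizing m with
  | nil => rfl
  | cons x S ih =>
    simp only [List.foldl_cons, ih]
    have : (m :: x :: S).reverse = S.reverse ++ [x, m] := by simp
    rw [this, fmL_snoc2]
    have h2 : (opLe m x :: S).reverse = S.reverse ++ [if m.2 ≤ x.2 then x else m] := by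
      simp [opLe]
    rw [h2]

theorem fm_snoc (T : List (Int × Int)) (m a : Int × Int) :
    fm m (T ++ [a]) = if (fm m T).2 < a.2 then a else fm m T := by
  induction T generalizing m with
  | nil => simp only [List.nil_append, fm]; split <;> split <;> first | rfl | omega
  | cons t T ih =>
    simp only [List.cons_append, fm, ih]
    have := fm_snd_le T t
    by_cases h1 : (fm t T).2 < a.2 <;>
      by_cases h2 : (fm t T).2 ≤ m.2 <;>
        simp [h1, h2] <;>
          first
          | (intros; exfalso; omega)
          | (split <;> split <;> first | rfl | (exfalso; omega))

theorem maxfold_go (g : Int → Nat) (f : Option Int → Int → Option Int)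
    (hf : ∀ mm x, f (some mm) x = if g mm < g x then some x else some mm) :
    ∀ (ds : List Int) (m : Int),
      List.foldl f (some m) ds
        = some ((List.foldl opLt (m, (g m : Int)) (ds.map fun d => (d, (g d : Int)))).1) := by
  intro ds
  induction ds with
  | nil => intro m; rfl
  | cons x ds ih =>
    intro m
    rw [List.foldl_cons, hf m x, List.map_cons, List.foldl_cons]
    by_cases h : g m < g x
    · have hc : ((g m : Int) < (g x : Int)) := by exact_mod_cast h
      rw [if_pos h, show opLt (m, (g m : Int)) (x, (g x : Int)) = (x, (g x : Int)) from by
        simp [opLt, hc]]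
      exact ih x
    · have hc : ¬((g m : Int) < (g x : Int)) := by exact_mod_cast h
      rw [if_neg h, show opLt (m, (g m : Int)) (x, (g x : Int)) = (m, (g m : Int)) from by
        simp [opLt, hc]]
      exact ih m

theorem maxfold_gen (g : Int → Nat) (f : Option Int → Int → Option Int)
    (hf0 : ∀ x, f none x = some x)
    (hf : ∀ mm x, f (some mm) x = if g mm < g x then some x else some mm)
    (ds : List Int) (x : Int) :
    List.foldl f none (x :: ds)
      = some ((List.foldl opLt (x, (g x : Int)) (ds.map fun d => (d, (g d : Int)))).1) := by
  rw [List.foldl_cons, hf0]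
  exact maxfold_go g f hf ds x

theorem get?_canon (L : List Int) (v : Int → Int) (k0 : Int) (h : k0 ∈ L) :
    (PySem.Dict.mk (L.map fun k => (k, v k))).get? k0 = some (v k0) := by
  induction L with
  | nil => simp at h
  | cons a L ih =>
    simp only [List.map_cons, PySem.Dict.get?, List.find?] at *
    by_cases ha : a = k0
    · subst ha; simp
    · have : k0 ∈ L := by
        rcases List.mem_cons.1 h with h' | h'
        · exact absurd h'.symm ha
        · exact h'
      simp only [show ((a, v a).1 == k0) = false from by simpa using ha]
      simpa [PySem.Dict.get?] using ih this

theorem insert_canon (L : List Int) (v : Int → Int) (k0 : Int) (h : k0 ∈ L) (w : Int) :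
    (PySem.Dict.mk (L.map fun k => (k, v k))).insert k0 w
      = PySem.Dict.mk (L.map fun k => (k, if k = k0 then w else v k)) := by
  have hc : (PySem.Dict.mk (L.map fun k => (k, v k))).contains k0 = true := by
    simp only [PySem.Dict.contains, List.any_map, List.any_eq_true]
    exact ⟨k0, h, by simp⟩
  simp only [PySem.Dict.insert, hc, if_pos, List.map_map]
  congr 1
  apply List.map_congr_left
  intro a _
  by_cases ha : a = k0 <;> simp [ha]

theorem modify_canon (L : List Int) (v : Int → Int) (k0 : Int) (h : k0 ∈ L) (f : Int → Int) :
    (PySem.Dict.mk (L.map fun k => (k, v k))).modify k0 0 f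
      = PySem.Dict.mk (L.map fun k => (k, if k = k0 then f (v k0) else v k)) := by
  rw [PySem.Dict.modify, PySem.Dict.getD, get?_canon L v k0 h]
  exact insert_canon L v k0 h (f (v k0))

theorem loopA_canon (M : Nat) (v : Int → Int) :
    modeLoopA (M : Int) (PySem.Dict.mk (L10.map fun k => (k, v k)))
      = PySem.Dict.mk (L10.map fun k => (k, v k + (cnt M k.toNat : Int))) := by
  induction M using Nat.strong_induction_on generalizing v with
  | _ M ih =>
  rcases Nat.eq_zero_or_pos M with hM | hM
  · subst hM
    rw [modeLoopA]
    simp only [show ¬ (0:Int) < (0:Nat) from by omega, dif_neg, not_false_iff]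
    congr 1
    apply List.map_congr_left
    intro k _
    simp [cnt]
  · rw [modeLoopA]
    have h0 : (0:Int) < (M:Int) := by exact_mod_cast hM
    rw [dif_pos h0]
    have hfd : PySem.Int.floordiv (M:Int) 10 = ((M / 10 : Nat) : Int) := by
      exact_mod_cast PySem.Int.floordiv_natCast M 10
    have hmd : PySem.Int.mod (M:Int) 10 = ((M % 10 : Nat) : Int) := by
      exact_mod_cast PySem.Int.mod_natCast M 10
    rw [hfd, hmd]
    have hmem : ((M % 10 : Nat) : Int) ∈ L10 := by
      exact List.mem_map_of_mem (List.mem_range.2 (by omega : M % 10 < 10))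
    rw [modify_canon L10 v _ hmem]
    rw [ih (M / 10) (Nat.div_lt_self hM (by norm_num)) _]
    congr 1
    apply List.map_congr_left
    intro k hk
    simp only [L10, List.mem_map] at hk
    obtain ⟨j, hj, rfl⟩ := hk
    have hj10 : j < 10 := List.mem_range.1 hj
    have hdig : Nat.digits 10 M = M % 10 :: Nat.digits 10 (M / 10) :=
      Nat.digits_def' (by norm_num) hM
    have htn : ((j:Int)).toNat = j := Int.toNat_natCast j
    by_cases hjk : j = M % 10
    · subst hjk
      simp only [htn, cnt, hdig, List.count_cons]
      simp
      ring
    · have h1 : ¬ ((j:Int) = ((M % 10 : Nat):Int)) := by exact_mod_cast hjk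
      simp only [if_neg h1, htn, cnt, hdig, List.count_cons]
      simp [Ne.symm hjk]

theorem toDigitsCore_eq (f : Nat) : ∀ (n : Nat) (ds : List Char), 0 < n → n ≤ f + 1 →
    Nat.toDigitsCore 10 (f + 1) n ds = ((Nat.digits 10 n).map Nat.digitChar).reverse ++ ds := by
  induction f with
  | zero =>
    intro n ds hn hf
    interval_cases n
    rfl
  | succ f ih =>
    intro n ds hn hf
    rw [Nat.toDigitsCore]
    have hdig : Nat.digits 10 n = n % 10 :: Nat.digits 10 (n / 10) :=
      Nat.digits_def' (by norm_num) hn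
    by_cases h : n / 10 = 0
    · simp only [h]
      have : Nat.digits 10 (n / 10) = [] := by simp [h]
      rw [hdig, this]
      rfl
    · rw [if_neg h]
      rw [ih (n / 10) _ (Nat.pos_of_ne_zero h) (by omega)]
      rw [hdig]
      simp

theorem toDigits_eq (M : Nat) (hM : 0 < M) :
    Nat.toDigits 10 M = ((Nat.digits 10 M).map Nat.digitChar).reverse := by
  have := toDigitsCore_eq M M [] hM (by omega)
  simpa [Nat.toDigits] using this

theorem count_go_single (c : Char) : ∀ (f : Nat) (s : List Char) (acc : Nat), s.length ≤ f →
    PySem.Chars.count.go [c] f s acc = acc + s.count c := by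
  intro f
  induction f with
  | zero =>
    intro s acc h
    have : s = [] := by cases s <;> simp_all
    subst this
    rfl
  | succ f ih =>
    intro s acc h
    cases s with
    | nil => rfl
    | cons a t =>
      rw [PySem.Chars.count.go]
      by_cases hc : c = a
      · subst hc
        rw [if_pos (by simp)]
        rw [show List.drop [c].length (c :: t) = t from rfl]
        simp only [List.length_cons] at h
        rw [ih t (acc + 1) (by omega)]
        simp
        omega
      · have : [c].isPrefixOf (a :: t) = false := by
          simp [List.isPrefixOf, hc]
        rw [if_neg (by simp [this])]
        simp only [List.length_cons] at h
        rw [ih t acc (by omega)]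
        simp [Ne.symm hc]

theorem chars_count_single (s : List Char) (c : Char) :
    PySem.Chars.count s [c] = s.count c := by
  rw [PySem.Chars.count]
  simp only [List.isEmpty]
  simpa using count_go_single c s.length s 0 (le_refl _)

theorem countg (M k : Nat) (hM : 0 < M) (hk : k < 10) :
    (PySem.Str.count (PySem.Int.toStr (M : Int)) (PySem.Int.toStr (k : Int)) : Int)
      = (cnt M k : Int) := by
  have hsingle : PySem.Int.toChars (k : Int) = [Nat.digitChar k] := by
    interval_cases k <;> rfl
  have hMchars : PySem.Int.toChars (M : Int) = Nat.toDigits 10 M := by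
    simp [PySem.Int.toChars, show ¬ ((M:Int) < 0) by omega]
  rw [PySem.Str.count, PySem.Int.toList_toStr, PySem.Int.toList_toStr, hsingle, hMchars,
    chars_count_single, toDigits_eq M hM, List.count_reverse]
  have hinj : ∀ a, a < 10 → ∀ b, b < 10 → ((Nat.digitChar a = Nat.digitChar b) ↔ a = b) := by
    decide
  have : List.count (Nat.digitChar k) ((Nat.digits 10 M).map Nat.digitChar)
      = (Nat.digits 10 M).count k := by
    simp only [List.count, List.countP_map]
    apply List.countP_congr
    intro x hx
    have hx10 : x < 10 := Nat.digits_lt_base (by norm_num) hx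
    simp [Function.comp, hinj x hx10 k hk]
  rw [this, cnt]

theorem hA_side (n : Int) (M : Nat) (hM : (if n < 0 then -n else n) = (M : Int)) (hMpos : 0 < M) :
    mode_digit n = (List.foldl opLe ((0:Int), (0:Int))
      (L10.map fun k => (k, (0:Int) + (cnt M k.toNat : Int)))).1 := by
  simp only [mode_digit]
  rw [hM]
  rw [if_neg (show ((M:Int) ≠ 0) from by exact_mod_cast hMpos.ne')]
  rw [show ((PySem.List.pyRange 0 10 1).foldl (fun d k => d.insert k 0) (PySem.Dict.mk []))
      = PySem.Dict.mk (L10.map fun k => (k, (0:Int))) from by rfl]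
  rw [loopA_canon M (fun _ => (0:Int))]
  rfl

theorem maxfold' (g : Int → Nat) (x : Int) (ds : List Int) :
    PySem.List.max? (x :: ds) g
      = some ((List.foldl opLt (x, (g x : Int)) (ds.map fun d => (d, (g d : Int)))).1) := by
  rw [PySem.List.max?]
  exact maxfold_gen g _ (fun _ => rfl) (fun _ _ => rfl) ds x

theorem hB_side (n : Int) (M : Nat) (hM : (if n < 0 then -n else n) = (M : Int)) :
    mode_digit_alt n = (List.foldl opLt
      ((9:Int), (PySem.Str.count (PySem.Int.toStr (M:Int)) (PySem.Int.toStr (9:Int)) : Int))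
      (([8,7,6,5,4,3,2,1,0] : List Int).map fun d =>
        (d, (PySem.Str.count (PySem.Int.toStr (M:Int)) (PySem.Int.toStr d) : Int)))).1 := by
  simp only [mode_digit_alt]
  rw [hM, show PySem.List.pyRange 9 (-1) (-1) = ([9,8,7,6,5,4,3,2,1,0] : List Int) from by decide,
    PySem.List.maxD]
  rw [show ([9,8,7,6,5,4,3,2,1,0] : List Int) = 9 :: [8,7,6,5,4,3,2,1,0] from rfl]
  rw [maxfold' (fun d => PySem.Str.count (PySem.Int.toStr (M:Int)) (PySem.Int.toStr d))
    9 [8,7,6,5,4,3,2,1,0]]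
  rfl

-- ===== VERDICT (by name: the statement is the Claim_ definition above) =====
theorem mode_digit_spec : Claim_equal_mode_digit := by
  unfold Claim_equal_mode_digit Spec_mode_digit
  intro n _
  by_cases h0 : (if n < 0 then -n else n) = 0
  · have hn : n = 0 := by by_cases h : n < 0 <;> simp [h] at h0 <;> omega
    subst hn
    decide
  · obtain ⟨M, hM⟩ : ∃ M : Nat, (if n < 0 then -n else n) = (M : Int) := by
      refine ⟨(if n < 0 then -n else n).toNat, ?_⟩
      by_cases h : n < 0 <;> simp [h] <;> omega
    have hMpos : 0 < M := by
      by_contra hc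
      have hz : M = 0 := by omega
      rw [hz] at hM
      exact h0 (by simpa using hM)
    rw [hA_side n M hM hMpos, hB_side n M hM]
    have h9 := countg M 9 hMpos (by norm_num)
    have h8 := countg M 8 hMpos (by norm_num)
    have h7 := countg M 7 hMpos (by norm_num)
    have h6 := countg M 6 hMpos (by norm_num)
    have h5 := countg M 5 hMpos (by norm_num)
    have h4 := countg M 4 hMpos (by norm_num)
    have h3 := countg M 3 hMpos (by norm_num)
    have h2 := countg M 2 hMpos (by norm_num)
    have h1 := countg M 1 hMpos (by norm_num)
    have hq0 := countg M 0 hMpos (by norm_num)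
    simp only [Nat.cast_ofNat, Nat.cast_zero, Nat.cast_one] at h9 h8 h7 h6 h5 h4 h3 h2 h1 hq0
    rw [show L10 = ([0,1,2,3,4,5,6,7,8,9] : List Int) from by decide]
    simp only [List.map_cons, List.map_nil, h9, h8, h7, h6, h5, h4, h3, h2, h1, hq0, zero_add,
      Int.toNat_zero, Int.toNat_one,
      show ((2:Int).toNat) = 2 from rfl, show ((3:Int).toNat) = 3 from rfl,
      show ((4:Int).toNat) = 4 from rfl, show ((5:Int).toNat) = 5 from rfl,
      show ((6:Int).toNat) = 6 from rfl, show ((7:Int).toNat) = 7 from rfl,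
      show ((8:Int).toNat) = 8 from rfl, show ((9:Int).toNat) = 9 from rfl]
    rw [foldl_opLe_eq_fmL, foldl_opLt_eq_fm]
    rw [show (((0:Int), (0:Int)) :: [((0:Int), (cnt M 0 : Int)), (1, (cnt M 1 : Int)),
        (2, (cnt M 2 : Int)), (3, (cnt M 3 : Int)), (4, (cnt M 4 : Int)), (5, (cnt M 5 : Int)),
        (6, (cnt M 6 : Int)), (7, (cnt M 7 : Int)), (8, (cnt M 8 : Int)),
        (9, (cnt M 9 : Int))]).reverse
      = ((9:Int), (cnt M 9 : Int)) :: ([((8:Int), (cnt M 8 : Int)), (7, (cnt M 7 : Int)),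
        (6, (cnt M 6 : Int)), (5, (cnt M 5 : Int)), (4, (cnt M 4 : Int)), (3, (cnt M 3 : Int)),
        (2, (cnt M 2 : Int)), (1, (cnt M 1 : Int)), (0, (cnt M 0 : Int))] ++ [((0:Int), (0:Int))])
      from by simp]
    rw [show fmL (((9:Int), (cnt M 9 : Int)) :: ([((8:Int), (cnt M 8 : Int)), (7, (cnt M 7 : Int)),
        (6, (cnt M 6 : Int)), (5, (cnt M 5 : Int)), (4, (cnt M 4 : Int)), (3, (cnt M 3 : Int)),
        (2, (cnt M 2 : Int)), (1, (cnt M 1 : Int)), (0, (cnt M 0 : Int))] ++ [((0:Int), (0:Int))]))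
      = fm ((9:Int), (cnt M 9 : Int)) ([((8:Int), (cnt M 8 : Int)), (7, (cnt M 7 : Int)),
        (6, (cnt M 6 : Int)), (5, (cnt M 5 : Int)), (4, (cnt M 4 : Int)), (3, (cnt M 3 : Int)),
        (2, (cnt M 2 : Int)), (1, (cnt M 1 : Int)), (0, (cnt M 0 : Int))] ++ [((0:Int), (0:Int))])
      from rfl]
    rw [fm_snoc]
    rw [if_neg (show ¬ (fm ((9:Int), (cnt M 9 : Int)) [((8:Int), (cnt M 8 : Int)),
        (7, (cnt M 7 : Int)), (6, (cnt M 6 : Int)), (5, (cnt M 5 : Int)), (4, (cnt M 4 : Int)),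
        (3, (cnt M 3 : Int)), (2, (cnt M 2 : Int)), (1, (cnt M 1 : Int)),
        (0, (cnt M 0 : Int))]).2 < ((0:Int), (0:Int)).2 from by
      have hle := fm_snd_le [((8:Int), (cnt M 8 : Int)), (7, (cnt M 7 : Int)),
        (6, (cnt M 6 : Int)), (5, (cnt M 5 : Int)), (4, (cnt M 4 : Int)), (3, (cnt M 3 : Int)),
        (2, (cnt M 2 : Int)), (1, (cnt M 1 : Int)), (0, (cnt M 0 : Int))]
        ((9:Int), (cnt M 9 : Int))
      have : (0:Int) ≤ (cnt M 9 : Int) := Int.natCast_nonneg _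
      simp only [] at hle ⊢
      omega)]
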